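-- pv_equiv track=rewrite | github.com/limdor/p2p-lending | p2p.py | filter_investment_files_by_newest_date
-- ===== SOURCE A (Python) =====
-- def get_latest_report_date(marketplace_files):
--     return max(marketplace_files.keys())
--
-- def filter_investment_files_by_newest_date(investment_data):
--     filtered_files = {}
--     for investment_platform, files in investment_data.items():
--         newest_date = get_latest_report_date(files)
--         filtered_files[investment_platform] = {
--             key: value for (key, value) in files.items() if key == newest_date
--         }
--     return filtered_files
-- ===== SOURCE B (Python) =====
-- def filter_investment_files_by_newest_date(investment_data):
--     filtered_files = {}
--     for investment_platform, files in investment_data.items():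
--         it = iter(files.items())
--         best_date, best_value = next(it)
--         for date, value in it:
--             if date > best_date:
--                 best_date, best_value = date, value
--         filtered_files[investment_platform] = {best_date: best_value}
--     return filtered_files
-- ===== Notes on version B (the rewrite author's own statement) =====
-- stated objective: simpler
-- what changed: Replaces the separate max-over-keys plus filtering comprehension with one fused pass over files.items() that tracks the best (date, value) pair and emits a singleton dict per platform.
import Mathlib
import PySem

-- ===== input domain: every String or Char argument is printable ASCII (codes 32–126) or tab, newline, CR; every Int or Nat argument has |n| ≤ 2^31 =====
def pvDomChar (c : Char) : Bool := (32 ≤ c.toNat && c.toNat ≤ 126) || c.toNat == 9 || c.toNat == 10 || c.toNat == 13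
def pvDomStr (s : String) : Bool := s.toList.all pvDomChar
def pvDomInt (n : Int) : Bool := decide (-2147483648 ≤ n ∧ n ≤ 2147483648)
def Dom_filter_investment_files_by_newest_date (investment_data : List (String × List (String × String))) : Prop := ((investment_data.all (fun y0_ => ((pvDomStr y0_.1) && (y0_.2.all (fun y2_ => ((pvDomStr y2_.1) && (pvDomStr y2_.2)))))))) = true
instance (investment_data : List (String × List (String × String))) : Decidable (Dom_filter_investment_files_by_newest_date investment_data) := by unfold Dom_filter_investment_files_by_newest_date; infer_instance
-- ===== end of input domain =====

-- B fuses A's max-over-keys + filtering comprehension into one pass per platform that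
-- tracks the best (date, value) pair; objective: simpler (one traversal, no helper).

-- ===== PORT A =====
-- helper of A: max(marketplace_files.keys())
def get_latest_report_date (marketplace_files : PySem.Dict String String) : Option String :=
  PySem.List.max? marketplace_files.keys (fun k => k)

def filter_investment_files_by_newest_date (investment_data : List (String × List (String × String))) : List (String × List (String × String)) :=
  ((PySem.Dict.ofList investment_data).items.foldl (fun filtered_files p =>
      let files := PySem.Dict.ofList p.2
      match get_latest_report_date files with
      | none => filtered_files.insert p.1 ([] : List (String × String))  -- max() raised ValueError: outside Pre_
      | some newest_date =>
          filtered_files.insert p.1 (files.items.filter (fun kv => kv.1 == newest_date)))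
    PySem.Dict.empty).items

-- ===== PORT B =====
def filter_investment_files_by_newest_date_alt (investment_data : List (String × List (String × String))) : List (String × List (String × String)) :=
  ((PySem.Dict.ofList investment_data).items.foldl (fun filtered_files p =>
      match (PySem.Dict.ofList p.2).items with
      | [] => filtered_files.insert p.1 ([] : List (String × String))  -- next(it) raised StopIteration: outside Pre_
      | q :: rest =>
          let best := rest.foldl (fun b r => if b.1 < r.1 then r else b) q
          filtered_files.insert p.1 [best])
    PySem.Dict.empty).items

-- ===== PRECONDITION & SPEC =====
-- Pre_ excludes exactly the inputs whose dict has an empty per-platform files dict: there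
-- Python A raises ValueError (max() of an empty sequence), so A returns on all other inputs.
def Pre_filter_investment_files_by_newest_date (investment_data : List (String × List (String × String))) : Prop :=
  ((PySem.Dict.ofList investment_data).values.all (fun v => !v.isEmpty)) = true
instance (investment_data : List (String × List (String × String))) : Decidable (Pre_filter_investment_files_by_newest_date investment_data) := by unfold Pre_filter_investment_files_by_newest_date; infer_instance

def pvWitness_filter_investment_files_by_newest_date : (List (String × List (String × String))) :=
  [("platformA", [("2020-01-01", "a.csv"), ("2021-05-02", "b.csv")]), ("platformB", [("2019-12-31", "c.csv")])]

def Spec_filter_investment_files_by_newest_date (investment_data : List (String × List (String × String))) (out : List (String × List (String × String))) : Prop := out = filter_investment_files_by_newest_date_alt investment_data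
instance (investment_data : List (String × List (String × String))) (out : List (String × List (String × String))) : Decidable (Spec_filter_investment_files_by_newest_date investment_data out) := by unfold Spec_filter_investment_files_by_newest_date; infer_instance

-- ===== CLAIM (what is proved, stated in full; the proofs are below) =====
def Claim_equal_filter_investment_files_by_newest_date : Prop := ∀ (investment_data : List (String × List (String × String))), Dom_filter_investment_files_by_newest_date investment_data → Pre_filter_investment_files_by_newest_date investment_data → Spec_filter_investment_files_by_newest_date investment_data (filter_investment_files_by_newest_date investment_data)

-- ===== LEMMAS AND PROOFS =====

-- B's running-best pair is a member of the list and carries its maximal key.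
theorem pv_best_spec (rest : List (String × String)) : ∀ (b : String × String),
    (rest.foldl (fun b r => if b.1 < r.1 then r else b) b) ∈ b :: rest ∧
    b.1 ≤ (rest.foldl (fun b r => if b.1 < r.1 then r else b) b).1 ∧
    ∀ q ∈ rest, q.1 ≤ (rest.foldl (fun b r => if b.1 < r.1 then r else b) b).1 := by
  induction rest with
  | nil => intro b; simp
  | cons r t ih =>
    intro b
    obtain ⟨hmem, hle, hall⟩ := ih (if b.1 < r.1 then r else b)
    refine ⟨?_, ?_, ?_⟩
    · simp only [List.foldl_cons]
      rcases List.mem_cons.mp hmem with h | h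
      · rw [h]; split_ifs <;> simp
      · exact List.mem_cons_of_mem _ (List.mem_cons_of_mem _ h)
    · simp only [List.foldl_cons]
      refine le_trans ?_ hle
      split_ifs with h
      · exact le_of_lt h
      · exact le_refl _
    · intro q hq
      simp only [List.foldl_cons]
      rcases List.mem_cons.mp hq with h | h
      · subst h
        refine le_trans ?_ hle
        split_ifs with h'
        · exact le_refl _
        · exact le_of_not_gt h'
      · exact hall q h

-- filtering an assoc list with nodup keys by its member key m gives exactly that pair
theorem pv_filter_singleton (l : List (String × String)) (m : String) (v : String)
    (hnd : (l.map Prod.fst).Nodup) (hmem : (m, v) ∈ l) :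
    l.filter (fun kv => kv.1 == m) = [(m, v)] := by
  induction l with
  | nil => simp at hmem
  | cons p t ih =>
    simp only [List.map_cons, List.nodup_cons] at hnd
    obtain ⟨hnotin, hndt⟩ := hnd
    rcases List.mem_cons.mp hmem with h | h
    · subst h
      simp only [List.filter_cons, BEq.rfl, if_pos]
      have : t.filter (fun kv => kv.1 == m) = [] := by
        apply List.filter_eq_nil_iff.mpr
        intro q hq hbeq
        have hq1 : q.1 ∈ t.map Prod.fst := List.mem_map.mpr ⟨q, hq, rfl⟩
        have he : q.1 = m := by simpa using hbeq
        rw [he] at hq1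
        exact hnotin hq1
      simp [this]
    · have hne : p.1 ≠ m := by
        intro he
        exact hnotin (by rw [he]; exact List.mem_map_of_mem h)
      simp only [List.filter_cons]
      rw [if_neg (by simpa using hne)]
      exact ih hndt h

-- updating a dict never shrinks it
theorem pv_size_le_update (l : List (String × String)) : ∀ (d : PySem.Dict String String),
    d.items.length ≤ (l.foldl (fun acc p => acc.insert p.1 p.2) d).items.length := by
  induction l with
  | nil => intro d; simp
  | cons p t ih =>
    intro d
    refine le_trans ?_ (ih (d.insert p.1 p.2))
    simp only [PySem.Dict.insert]
    split_ifs <;> simp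

theorem pv_items_ofList_ne_nil (l : List (String × String)) (h : l ≠ []) :
    (PySem.Dict.ofList l).items ≠ [] := by
  match l, h with
  | p :: t, _ =>
    have := pv_size_le_update t (PySem.Dict.empty.insert p.1 p.2)
    have h1 : (PySem.Dict.empty.insert p.1 p.2).items.length = 1 := by
      simp [PySem.Dict.insert, PySem.Dict.empty, PySem.Dict.contains]
    intro hnil
    simp only [PySem.Dict.ofList, PySem.Dict.update, List.foldl_cons] at hnil
    rw [hnil] at this
    simp [h1] at this

-- per-platform step values agree when the files dict is nonempty
theorem pv_step_eq (files : List (String × String)) (hne : files ≠ []) :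
    (match get_latest_report_date (PySem.Dict.ofList files) with
     | none => ([] : List (String × String))
     | some newest_date =>
         (PySem.Dict.ofList files).items.filter (fun kv => kv.1 == newest_date)) =
    (match (PySem.Dict.ofList files).items with
     | [] => ([] : List (String × String))
     | q :: rest => [rest.foldl (fun b r => if b.1 < r.1 then r else b) q]) := by
  have hitems : (PySem.Dict.ofList files).items ≠ [] := pv_items_ofList_ne_nil files hne
  have hnd : ((PySem.Dict.ofList files).items.map Prod.fst).Nodup := by
    have := PySem.Dict.nodup_keys_ofList files
    simpa [PySem.Dict.keys] using this
  match hit : (PySem.Dict.ofList files).items with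
  | [] => exact absurd hit hitems
  | q :: rest =>
    set r := rest.foldl (fun b r => if b.1 < r.1 then r else b) q with hr
    obtain ⟨hrmem, hrq, hrall⟩ := pv_best_spec rest q
    rw [← hr] at hrmem hrq hrall
    have hkeys : (PySem.Dict.ofList files).keys = (q :: rest).map Prod.fst := by
      simp [PySem.Dict.keys, hit]
    have hmax : PySem.List.max? (PySem.Dict.ofList files).keys (fun k => k) = some r.1 := by
      rcases hm : PySem.List.max? (PySem.Dict.ofList files).keys (fun k => k) with _ | m
      · rw [PySem.List.max?_eq_none_iff] at hm
        rw [hkeys] at hm; simp at hm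
      · have hmem : m ∈ (q :: rest).map Prod.fst := by
          rw [← hkeys]; exact PySem.List.max?_mem hm
        obtain ⟨pm, hpm, hpm1⟩ := List.mem_map.mp hmem
        have h1 : m ≤ r.1 := by
          rw [← hpm1]
          rcases List.mem_cons.mp hpm with h | h
          · rw [h]; exact hrq
          · exact hrall pm h
        have h2 : r.1 ≤ m := by
          have : r.1 ∈ (PySem.Dict.ofList files).keys := by
            rw [hkeys]; exact List.mem_map_of_mem hrmem
          exact PySem.List.max?_isMax hm r.1 this
        rw [le_antisymm h2 h1]
    simp only [get_latest_report_date, hmax]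
    exact pv_filter_singleton (q :: rest) r.1 r.2 (by rw [← hit]; exact hnd)
      (by rw [Prod.mk.eta]; exact hrmem)

-- ===== VERDICT (by name: the statement is the Claim_ definition above) =====
theorem filter_investment_files_by_newest_date_spec : Claim_equal_filter_investment_files_by_newest_date := by
  intro inv _ hpre
  unfold Spec_filter_investment_files_by_newest_date
  unfold filter_investment_files_by_newest_date filter_investment_files_by_newest_date_alt
  congr 1
  apply PySem.List.foldl_congr_mem
  intro acc p hp
  have hval : p.2 ∈ (PySem.Dict.ofList inv).values := by
    simp only [PySem.Dict.values]
    exact List.mem_map_of_mem hp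
  have hne : p.2 ≠ [] := by
    unfold Pre_filter_investment_files_by_newest_date at hpre
    have := List.all_eq_true.mp hpre p.2 hval
    simpa [List.isEmpty_iff] using this
  have key := pv_step_eq p.2 hne
  rcases hm : get_latest_report_date (PySem.Dict.ofList p.2) with _ | nd <;>
    rcases hi : (PySem.Dict.ofList p.2).items with _ | ⟨q, rest⟩ <;>
    simp only [hm, hi] at key ⊢
  · simp at key
  · rw [key]
  · rw [key]
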